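-- pv_equiv track=rewrite | github.com/Artfical/TSharp | 4.1.01.04.26/RPI/main.py | _yazdir_tokenize
-- ===== SOURCE A (Python) =====
-- def _yazdir_tokenize(metin):
--     """
--     yazdir icin govdeyi parcalara ayirir.
--
--     Kural:
--       - "..." -> tek string token (icindeki her sey korunur)
--       - String olmayan kisimlar -> iki "..." arasinda kalan kisim tek ifade sayilir
--
--     Ornekler:
--       "Merhaba"           -> ['"Merhaba"']
--       x                   -> ['x']
--       x + y               -> ['x + y']          (tek ifade olarak eval edilir)
--       "Isim:" isim        -> ['"Isim:"', 'isim']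
--       "A:" x + y "B:" z   -> ['"A:"', 'x + y', '"B:"', 'z']
--     """
--     parcalar = []
--     i = 0
--     n = len(metin)
--     while i < n:
--         # Boslukları atla
--         while i < n and metin[i] == ' ':
--             i += 1
--         if i >= n:
--             break
--         # String literal mi?
--         if metin[i] in ('"', "'"):
--             str_ch = metin[i]
--             j = i + 1
--             while j < n and metin[j] != str_ch:
--                 j += 1
--             j += 1  # kapatan tirnak dahil
--             parcalar.append(metin[i:j])
--             i = j
--         else:
--             # String olmayan bolum: sonraki " veya string basina kadar al
--             j = i
--             while j < n and metin[j] not in ('"', "'"):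
--                 j += 1
--             bolum = metin[i:j].strip()
--             if bolum:
--                 parcalar.append(bolum)
--             i = j
--     return parcalar if parcalar else [metin]
-- ===== SOURCE B (Python) =====
-- def _yazdir_tokenize(metin):
--     # One-pass character state machine (fold) instead of index-based nested scans.
--     tokens = []
--     expr = []          # chars of the current non-string segment
--     lit = None         # quote char if inside a string literal, else None
--     buf = []           # chars of the current string literal (including opening quote)
--     for ch in metin:
--         if lit is not None:
--             buf.append(ch)
--             if ch == lit:
--                 tokens.append(''.join(buf))
--                 lit, buf = None, []
--         elif ch in ('"', "'"):
--             e = ''.join(expr).strip()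
--             if e:
--                 tokens.append(e)
--             expr = []
--             lit = ch
--             buf = [ch]
--         else:
--             expr.append(ch)
--     if lit is not None:
--         tokens.append(''.join(buf))
--     else:
--         e = ''.join(expr).strip()
--         if e:
--             tokens.append(e)
--     return tokens if tokens else [metin]
-- ===== Notes on version B (the rewrite author's own statement) =====
-- stated objective: alternative
-- what changed: A's index-based outer while loop with three nested inner scanning loops and slicing is replaced by a single one-pass character state machine (a fold carrying tokens/current-expression/open-quote/literal-buffer) with a post-loop flush.
import Mathlib
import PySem

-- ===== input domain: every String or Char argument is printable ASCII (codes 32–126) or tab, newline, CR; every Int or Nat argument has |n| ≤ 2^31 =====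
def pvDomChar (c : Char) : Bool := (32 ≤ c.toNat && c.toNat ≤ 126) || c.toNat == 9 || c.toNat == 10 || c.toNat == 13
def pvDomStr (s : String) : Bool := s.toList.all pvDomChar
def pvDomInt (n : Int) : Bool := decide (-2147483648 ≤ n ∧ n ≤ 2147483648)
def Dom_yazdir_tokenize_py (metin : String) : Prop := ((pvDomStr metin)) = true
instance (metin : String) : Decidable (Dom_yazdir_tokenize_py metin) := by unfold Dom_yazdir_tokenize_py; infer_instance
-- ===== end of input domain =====

-- B re-implements A's index-based nested-scan tokenizer as a single one-pass character
-- state machine (a fold); same return value, no side effects ('alternative' objective).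

-- ===== PORT A =====
-- A-side helpers: the three inner `while` loops of A, as index recursions with the same state.

-- `while i < n and metin[i] == ' ': i += 1`
def pvSkipSpaces (s : List Char) (n i : Nat) : Nat :=
  if h : i < n ∧ s.getD i ' ' = ' ' then pvSkipSpaces s n (i + 1) else i
  termination_by n - i
  decreasing_by omega

-- `while j < n and metin[j] != str_ch: j += 1`
def pvFindClose (s : List Char) (n : Nat) (q : Char) (j : Nat) : Nat :=
  if h : j < n ∧ ¬ s.getD j q = q then pvFindClose s n q (j + 1) else j
  termination_by n - j
  decreasing_by omega

-- `while j < n and metin[j] not in ('"', "'"): j += 1`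
def pvFindQuote (s : List Char) (n j : Nat) : Nat :=
  if h : j < n ∧ ¬ (s.getD j ' ' = '"' ∨ s.getD j ' ' = '\'') then pvFindQuote s n (j + 1) else j
  termination_by n - j
  decreasing_by omega

-- lower bounds on the scan results, cited by the main loop's decreasing_by
theorem pvSkipSpaces_le (s : List Char) (n i : Nat) : i ≤ pvSkipSpaces s n i := by
  fun_induction pvSkipSpaces s n i with
  | case1 i h ih => omega
  | case2 i h => omega

theorem pvFindClose_le (s : List Char) (n : Nat) (q : Char) (j : Nat) : j ≤ pvFindClose s n q j := by
  fun_induction pvFindClose s n q j with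
  | case1 j h ih => omega
  | case2 j h => omega

theorem pvFindQuote_le (s : List Char) (n j : Nat) : j ≤ pvFindQuote s n j := by
  fun_induction pvFindQuote s n j with
  | case1 j h ih => omega
  | case2 j h => omega

theorem pvFindQuote_succ (s : List Char) (n j : Nat) (h : j < n)
    (hq : ¬ (s.getD j ' ' = '"' ∨ s.getD j ' ' = '\'')) :
    pvFindQuote s n j = pvFindQuote s n (j + 1) := by
  rw [pvFindQuote]; simp only [h, hq, and_self, not_false_eq_true, dif_pos]

-- the outer `while i < n` loop of A (the locals i', j, bolum are inlined)
def pvLoopA (s : List Char) (n i : Nat) (parcalar : List String) : List String :=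
  if hi : i < n then
    if hi' : pvSkipSpaces s n i < n then
      if hq : s.getD (pvSkipSpaces s n i) ' ' = '"' ∨ s.getD (pvSkipSpaces s n i) ' ' = '\'' then
        -- string literal: scan for the closing quote, slice metin[i:j+1]
        pvLoopA s n
          (pvFindClose s n (s.getD (pvSkipSpaces s n i) ' ') (pvSkipSpaces s n i + 1) + 1)
          (parcalar ++ [String.mk ((s.drop (pvSkipSpaces s n i)).take
            (pvFindClose s n (s.getD (pvSkipSpaces s n i) ' ') (pvSkipSpaces s n i + 1) + 1
              - pvSkipSpaces s n i))])
      else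
        -- non-string part: scan to the next quote, slice metin[i:j], strip, append if nonempty
        pvLoopA s n (pvFindQuote s n (pvSkipSpaces s n i))
          (if PySem.Chars.strip ((s.drop (pvSkipSpaces s n i)).take
                (pvFindQuote s n (pvSkipSpaces s n i) - pvSkipSpaces s n i)) = []
           then parcalar
           else parcalar ++ [String.mk (PySem.Chars.strip ((s.drop (pvSkipSpaces s n i)).take
                (pvFindQuote s n (pvSkipSpaces s n i) - pvSkipSpaces s n i)))])
    else parcalar
  else parcalar
  termination_by n - i
  decreasing_by
  · have h1 := pvSkipSpaces_le s n i
    have h2 := pvFindClose_le s n (s.getD (pvSkipSpaces s n i) ' ') (pvSkipSpaces s n i + 1)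
    omega
  · have h1 := pvSkipSpaces_le s n i
    have h2 := pvFindQuote_le s n (pvSkipSpaces s n i + 1)
    rw [pvFindQuote_succ s n (pvSkipSpaces s n i) hi' hq]
    omega

def yazdir_tokenize_py (metin : String) : List String :=
  let parcalar := pvLoopA metin.toList metin.toList.length 0 []
  if parcalar = [] then [metin] else parcalar

-- ===== PORT B =====
-- B-side helpers: the fold step (the body of Source B's `for ch in metin`) and the
-- post-loop finisher (Source B's trailing if/else). State = (tokens, expr, lit, buf).

def pvStepB (st : List String × List Char × Option Char × List Char) (ch : Char) :
    List String × List Char × Option Char × List Char :=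
  match st with
  | (tokens, expr, some q, buf) =>
    let buf' := buf ++ [ch]
    if ch = q then (tokens ++ [String.mk buf'], expr, none, []) else (tokens, expr, some q, buf')
  | (tokens, expr, none, buf) =>
    if ch = '"' ∨ ch = '\'' then
      let e := PySem.Chars.strip expr
      ((if e = [] then tokens else tokens ++ [String.mk e]), [], some ch, [ch])
    else (tokens, expr ++ [ch], none, buf)

def pvFinB (st : List String × List Char × Option Char × List Char) : List String :=
  match st with
  | (tokens, _, some _, buf) => tokens ++ [String.mk buf]
  | (tokens, expr, none, _) =>
    let e := PySem.Chars.strip expr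
    if e = [] then tokens else tokens ++ [String.mk e]

def yazdir_tokenize_py_alt (metin : String) : List String :=
  let tokens := pvFinB (metin.toList.foldl pvStepB ([], [], none, []))
  if tokens = [] then [metin] else tokens

-- ===== PRECONDITION & SPEC =====
def Spec_yazdir_tokenize_py (metin : String) (out : List String) : Prop := out = yazdir_tokenize_py_alt metin
instance (metin : String) (out : List String) : Decidable (Spec_yazdir_tokenize_py metin out) := by unfold Spec_yazdir_tokenize_py; infer_instance

-- ===== CLAIM (what is proved, stated in full; the proofs are below) =====
def Claim_equal_yazdir_tokenize_py : Prop := ∀ (metin : String), Dom_yazdir_tokenize_py metin → Spec_yazdir_tokenize_py metin (yazdir_tokenize_py metin)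

-- ===== LEMMAS AND PROOFS =====

-- Common reference tokenization: split off the non-quote gap, emit its strip if
-- nonempty, then the literal up to the (optional) closing quote, and recurse.
def pvIsQuote (c : Char) : Bool := c == '"' || c == '\''

def pvTok (cs : List Char) : List String :=
  let gap := cs.takeWhile (fun c => !pvIsQuote c)
  (if PySem.Chars.strip gap = [] then [] else [String.mk (PySem.Chars.strip gap)]) ++
  match hr : cs.dropWhile (fun c => !pvIsQuote c) with
  | [] => []
  | q :: t =>
    match hw : t.dropWhile (fun c => c != q) with
    | [] => [String.mk (q :: t.takeWhile (fun c => c != q))]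
    | _ :: t' => String.mk (q :: t.takeWhile (fun c => c != q) ++ [q]) :: pvTok t'
  termination_by cs.length
  decreasing_by
    have h1 := List.length_dropWhile_le (fun c => !pvIsQuote c) cs
    have h2 := List.length_dropWhile_le (fun c => c != q) t
    rw [hr] at h1; rw [hw] at h2
    simp at h1 h2; omega

theorem pvTok_nil : pvTok [] = [] := by rw [pvTok]; rfl

-- strip absorbs an all-space prefix
theorem pvStrip_space_prefix (p x : List Char) (hp : ∀ c ∈ p, c = ' ') :
    PySem.Chars.strip (p ++ x) = PySem.Chars.strip x := by
  induction p with
  | nil => rfl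
  | cons a t ih =>
    have ha : a = ' ' := hp a (by simp)
    simp only [PySem.Chars.strip, PySem.Chars.lstrip, List.cons_append, List.dropWhile_cons] at *
    subst ha
    simp only [show PySem.Chars.isspace ' ' = true from by decide, if_true]
    exact ih (fun c hc => hp c (by simp [hc]))

theorem pvTakeWhile_dropWhile_nil {α : Type} (p : α → Bool) (l : List α) :
    List.takeWhile p (List.dropWhile p l) = [] := by
  cases h : List.dropWhile p l with
  | nil => simp
  | cons a t =>
    have hh := List.head_dropWhile_not p (l := l) (by simp [h])
    simp only [h, List.head_cons] at hh
    simp [hh]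

-- gap/rest splitting of pvTok at the first quote
theorem pvTok_split (cs : List Char) :
    pvTok cs = (if PySem.Chars.strip (cs.takeWhile (fun c => !pvIsQuote c)) = [] then []
                else [String.mk (PySem.Chars.strip (cs.takeWhile (fun c => !pvIsQuote c)))]) ++
               pvTok (cs.dropWhile (fun c => !pvIsQuote c)) := by
  conv_rhs => rw [pvTok]
  rw [pvTok]
  rw [pvTakeWhile_dropWhile_nil, List.dropWhile_idempotent]
  simp [PySem.Chars.strip, PySem.Chars.lstrip, PySem.Chars.rstrip]

-- all-satisfying prefixes pass through takeWhile/dropWhile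
theorem pvTakeWhile_append_all {α : Type} (p : α → Bool) (l₁ l₂ : List α)
    (h : ∀ c ∈ l₁, p c = true) :
    List.takeWhile p (l₁ ++ l₂) = l₁ ++ List.takeWhile p l₂ := by
  induction l₁ with
  | nil => simp
  | cons a t ih =>
    simp only [List.cons_append, List.takeWhile_cons, h a (by simp)]
    simp [ih (fun c hc => h c (by simp [hc]))]

theorem pvDropWhile_append_all {α : Type} (p : α → Bool) (l₁ l₂ : List α)
    (h : ∀ c ∈ l₁, p c = true) :
    List.dropWhile p (l₁ ++ l₂) = List.dropWhile p l₂ := by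
  induction l₁ with
  | nil => simp
  | cons a t ih =>
    simp only [List.cons_append, List.dropWhile_cons, h a (by simp), if_true]
    exact ih (fun c hc => h c (by simp [hc]))

-- ===== A-side characterizations =====

theorem pvSkipSpaces_eq (s : List Char) (i : Nat) :
    pvSkipSpaces s s.length i = i + ((s.drop i).takeWhile (fun c => c == ' ')).length := by
  fun_induction pvSkipSpaces s s.length i with
  | case1 i h ih =>
    obtain ⟨hlt, hsp⟩ := h
    rw [List.getD_eq_getElem s ' ' hlt] at hsp
    rw [List.drop_eq_getElem_cons hlt, List.takeWhile_cons]
    simp [hsp, ih]; omega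
  | case2 i h =>
    by_cases hlt : i < s.length
    · have hsp : ¬ s.getD i ' ' = ' ' := by tauto
      rw [List.getD_eq_getElem s ' ' hlt] at hsp
      rw [List.drop_eq_getElem_cons hlt, List.takeWhile_cons]
      simp [hsp]
    · rw [List.drop_eq_nil_of_le (by omega)]; simp

theorem pvFindQuote_eq (s : List Char) (j : Nat) :
    pvFindQuote s s.length j = j + ((s.drop j).takeWhile (fun c => !pvIsQuote c)).length := by
  fun_induction pvFindQuote s s.length j with
  | case1 j h ih =>
    obtain ⟨hlt, hnq⟩ := h
    rw [List.getD_eq_getElem s ' ' hlt] at hnq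
    rw [List.drop_eq_getElem_cons hlt, List.takeWhile_cons]
    have : pvIsQuote s[j] = false := by simp [pvIsQuote]; tauto
    simp [this, ih]; omega
  | case2 j h =>
    by_cases hlt : j < s.length
    · have hnq : s.getD j ' ' = '"' ∨ s.getD j ' ' = '\'' := by tauto
      rw [List.getD_eq_getElem s ' ' hlt] at hnq
      rw [List.drop_eq_getElem_cons hlt, List.takeWhile_cons]
      have : pvIsQuote s[j] = true := by simp [pvIsQuote]; tauto
      simp [this]
    · rw [List.drop_eq_nil_of_le (by omega)]; simp

theorem pvFindClose_eq (s : List Char) (q : Char) (j : Nat) :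
    pvFindClose s s.length q j = j + ((s.drop j).takeWhile (fun c => c != q)).length := by
  fun_induction pvFindClose s s.length q j with
  | case1 j h ih =>
    obtain ⟨hlt, hne⟩ := h
    rw [List.getD_eq_getElem s q hlt] at hne
    rw [List.drop_eq_getElem_cons hlt, List.takeWhile_cons]
    simp [hne, ih]; omega
  | case2 j h =>
    by_cases hlt : j < s.length
    · have hne : s.getD j q = q := by tauto
      rw [List.getD_eq_getElem s q hlt] at hne
      rw [List.drop_eq_getElem_cons hlt, List.takeWhile_cons]
      simp [hne]
    · rw [List.drop_eq_nil_of_le (by omega)]; simp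

theorem pvTok_of_all_nonquote (expr : List Char) (h : ∀ c ∈ expr, pvIsQuote c = false) :
    pvTok expr = (if PySem.Chars.strip expr = [] then [] else [String.mk (PySem.Chars.strip expr)]) := by
  have ht : expr.takeWhile (fun c => !pvIsQuote c) = expr :=
    List.takeWhile_eq_self_iff.mpr (fun c hc => by simp [h c hc])
  have hd : expr.dropWhile (fun c => !pvIsQuote c) = [] :=
    List.dropWhile_eq_nil_iff.mpr (fun c hc => by simp [h c hc])
  rw [pvTok, ht, hd]
  simp

theorem pvTok_quote_cons (q : Char) (cs : List Char) (hq : pvIsQuote q = true) :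
    pvTok (q :: cs) =
      match cs.dropWhile (fun c => c != q) with
      | [] => [String.mk (q :: cs.takeWhile (fun c => c != q))]
      | _ :: t' => String.mk (q :: cs.takeWhile (fun c => c != q) ++ [q]) :: pvTok t' := by
  have ht : (q :: cs).takeWhile (fun c => !pvIsQuote c) = [] := by
    simp [hq]
  have hd : (q :: cs).dropWhile (fun c => !pvIsQuote c) = q :: cs := by
    simp [hq]
  rw [pvTok, ht, hd]
  have h0 : (if PySem.Chars.strip [] = ([] : List Char) then ([] : List String)
      else [String.mk (PySem.Chars.strip [])]) = [] := by rfl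
  simp only [h0, List.nil_append]
  split <;> rename_i heq <;> simp only [heq]

theorem pvTok_gap_quote (expr : List Char) (q : Char) (cs : List Char)
    (hexpr : ∀ c ∈ expr, pvIsQuote c = false) (hq : pvIsQuote q = true) :
    pvTok (expr ++ q :: cs) =
      (if PySem.Chars.strip expr = [] then [] else [String.mk (PySem.Chars.strip expr)]) ++
      pvTok (q :: cs) := by
  have hg : (expr ++ q :: cs).takeWhile (fun x => !pvIsQuote x) = expr := by
    rw [pvTakeWhile_append_all _ _ _ (fun x hx => by simp [hexpr x hx])]
    simp [hq]
  have hd : (expr ++ q :: cs).dropWhile (fun x => !pvIsQuote x) = q :: cs := by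
    rw [pvDropWhile_append_all _ _ _ (fun x hx => by simp [hexpr x hx])]
    simp [hq]
  rw [pvTok_split (expr ++ q :: cs), hg, hd]

theorem pvDropWhile_eq_drop {α : Type} (p : α → Bool) (l : List α) :
    l.drop (l.takeWhile p).length = l.dropWhile p := by
  have h := List.drop_left (l₁ := l.takeWhile p) (l₂ := l.dropWhile p)
  rw [List.takeWhile_append_dropWhile] at h
  exact h

theorem pvTakeWhile_eq_take {α : Type} (p : α → Bool) (l : List α) :
    l.take (l.takeWhile p).length = l.takeWhile p := by
  have h := List.take_left (l₁ := l.takeWhile p) (l₂ := l.dropWhile p)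
  rw [List.takeWhile_append_dropWhile] at h
  exact h

theorem pvLoopA_eq (s : List Char) : ∀ (k i : Nat) (acc : List String),
    s.length - i ≤ k → pvLoopA s s.length i acc = acc ++ pvTok (s.drop i) := by
  intro k
  induction k with
  | zero =>
    intro i acc h
    rw [pvLoopA, dif_neg (by omega), List.drop_eq_nil_of_le (by omega), pvTok_nil,
      List.append_nil]
  | succ k ih =>
    intro i acc h
    by_cases hi : i < s.length
    · rw [pvLoopA, dif_pos hi]
      have hiq := pvSkipSpaces_eq s i
      have hspall : ∀ c ∈ (s.drop i).takeWhile (fun c => c == ' '), c = ' ' := by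
        intro c hc; simpa using List.mem_takeWhile_imp hc
      have hspq : ∀ c ∈ (s.drop i).takeWhile (fun c => c == ' '), pvIsQuote c = false := by
        intro c hc; rw [hspall c hc]; decide
      have hstripsp : PySem.Chars.strip ((s.drop i).takeWhile (fun c => c == ' ')) = [] := by
        have h2 := pvStrip_space_prefix ((s.drop i).takeWhile (fun c => c == ' ')) [] hspall
        rw [List.append_nil] at h2
        rw [h2]; rfl
      have key1 : s.drop (pvSkipSpaces s s.length i)
          = (s.drop i).dropWhile (fun c => c == ' ') := by
        rw [hiq, ← List.drop_drop]; exact pvDropWhile_eq_drop _ _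
      have hsplit : (s.drop i).takeWhile (fun c => c == ' ')
          ++ s.drop (pvSkipSpaces s s.length i) = s.drop i := by
        rw [key1]; exact List.takeWhile_append_dropWhile
      by_cases hi' : pvSkipSpaces s s.length i < s.length
      · rw [dif_pos hi']
        have hget : s.getD (pvSkipSpaces s s.length i) ' ' = s[pvSkipSpaces s s.length i] :=
          List.getD_eq_getElem s ' ' hi'
        have hcons : s.drop (pvSkipSpaces s s.length i)
            = s[pvSkipSpaces s s.length i] :: s.drop (pvSkipSpaces s s.length i + 1) :=
          List.drop_eq_getElem_cons hi'
        by_cases hq : s.getD (pvSkipSpaces s s.length i) ' ' = '"'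
            ∨ s.getD (pvSkipSpaces s s.length i) ' ' = '\''
        · -- string-literal branch
          rw [dif_pos hq, hget]
          have hqt : pvIsQuote s[pvSkipSpaces s s.length i] = true := by
            rw [hget] at hq
            rcases hq with hq | hq <;> simp [pvIsQuote, hq]
          have hclose := pvFindClose_eq s s[pvSkipSpaces s s.length i]
            (pvSkipSpaces s s.length i + 1)
          rw [hclose]
          have hsplit2 := List.takeWhile_append_dropWhile
            (p := fun c => c != s[pvSkipSpaces s s.length i])
            (l := s.drop (pvSkipSpaces s s.length i + 1))
          have hdropj : s.drop (pvSkipSpaces s s.length i + 1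
                + ((s.drop (pvSkipSpaces s s.length i + 1)).takeWhile
                    (fun c => c != s[pvSkipSpaces s s.length i])).length)
              = (s.drop (pvSkipSpaces s s.length i + 1)).dropWhile
                  (fun c => c != s[pvSkipSpaces s s.length i]) := by
            rw [← List.drop_drop]; exact pvDropWhile_eq_drop _ _
          have harith : pvSkipSpaces s s.length i + 1
                + ((s.drop (pvSkipSpaces s s.length i + 1)).takeWhile
                    (fun c => c != s[pvSkipSpaces s s.length i])).length + 1
                - pvSkipSpaces s s.length i
              = ((s.drop (pvSkipSpaces s s.length i + 1)).takeWhile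
                    (fun c => c != s[pvSkipSpaces s s.length i])).length + 1 + 1 := by omega
          have htoken : (s.drop (pvSkipSpaces s s.length i + 1)).take
                (((s.drop (pvSkipSpaces s s.length i + 1)).takeWhile
                    (fun c => c != s[pvSkipSpaces s s.length i])).length + 1)
              = (s.drop (pvSkipSpaces s s.length i + 1)).takeWhile
                    (fun c => c != s[pvSkipSpaces s s.length i])
                ++ ((s.drop (pvSkipSpaces s s.length i + 1)).dropWhile
                    (fun c => c != s[pvSkipSpaces s s.length i])).take 1 := by
            have h4 := List.take_length_add_append
              (l₁ := (s.drop (pvSkipSpaces s s.length i + 1)).takeWhile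
                  (fun c => c != s[pvSkipSpaces s s.length i]))
              (l₂ := (s.drop (pvSkipSpaces s s.length i + 1)).dropWhile
                  (fun c => c != s[pvSkipSpaces s s.length i])) 1
            rw [hsplit2] at h4
            exact h4
          rw [harith, hcons, List.take_succ_cons, htoken]
          -- the right-hand side
          conv_rhs => rw [← hsplit, hcons]
          rw [pvTok_gap_quote _ _ _ hspq hqt, hstripsp, if_pos rfl, List.nil_append,
            pvTok_quote_cons _ _ hqt]
          cases hr2 : (s.drop (pvSkipSpaces s s.length i + 1)).dropWhile
              (fun c => c != s[pvSkipSpaces s s.length i]) with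
          | nil =>
            have hlen : s.length ≤ pvSkipSpaces s s.length i + 1
                + ((s.drop (pvSkipSpaces s s.length i + 1)).takeWhile
                    (fun c => c != s[pvSkipSpaces s s.length i])).length := by
              have := hdropj; rw [hr2] at this
              have h3 := List.drop_eq_nil_iff.mp this
              omega
            rw [ih _ _ (by omega)]
            rw [show s.drop (pvSkipSpaces s s.length i + 1
                  + ((s.drop (pvSkipSpaces s s.length i + 1)).takeWhile
                      (fun c => c != s[pvSkipSpaces s s.length i])).length + 1) = []
                from List.drop_eq_nil_of_le (by omega)]
            rw [pvTok_nil, List.append_nil]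
            simp
          | cons x t' =>
            have hx : x = s[pvSkipSpaces s s.length i] := by
              have hne : (s.drop (pvSkipSpaces s s.length i + 1)).dropWhile
                  (fun c => c != s[pvSkipSpaces s s.length i]) ≠ [] := by rw [hr2]; simp
              have hh := List.head_dropWhile_not
                (fun c => c != s[pvSkipSpaces s s.length i]) hne
              simp only [hr2, List.head_cons] at hh
              simpa using hh
            have hdropj1 : s.drop (pvSkipSpaces s s.length i + 1
                  + ((s.drop (pvSkipSpaces s s.length i + 1)).takeWhile
                      (fun c => c != s[pvSkipSpaces s s.length i])).length + 1) = t' := by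
              rw [← List.drop_drop, hdropj, hr2]; rfl
            have hii : i ≤ pvSkipSpaces s s.length i := pvSkipSpaces_le s s.length i
            rw [ih _ _ (by omega), hdropj1]
            simp [hx]
        · -- expression branch
          rw [dif_neg hq]
          have hqf : pvIsQuote s[pvSkipSpaces s s.length i] = false := by
            rw [hget] at hq
            push_neg at hq
            simp [pvIsQuote, hq.1, hq.2]
          have hfq := pvFindQuote_eq s (pvSkipSpaces s s.length i)
          rw [hfq]
          have harith : pvSkipSpaces s s.length i
                + ((s.drop (pvSkipSpaces s s.length i)).takeWhile (fun c => !pvIsQuote c)).length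
                - pvSkipSpaces s s.length i
              = ((s.drop (pvSkipSpaces s s.length i)).takeWhile
                  (fun c => !pvIsQuote c)).length := by omega
          rw [harith, pvTakeWhile_eq_take]
          have hgaplen : 1 ≤ ((s.drop (pvSkipSpaces s s.length i)).takeWhile
              (fun c => !pvIsQuote c)).length := by
            rw [hcons, List.takeWhile_cons]
            simp [hqf]
          have hii : i ≤ pvSkipSpaces s s.length i := pvSkipSpaces_le s s.length i
          have hdropj : s.drop (pvSkipSpaces s s.length i
                + ((s.drop (pvSkipSpaces s s.length i)).takeWhile
                    (fun c => !pvIsQuote c)).length)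
              = (s.drop (pvSkipSpaces s s.length i)).dropWhile (fun c => !pvIsQuote c) := by
            rw [← List.drop_drop]; exact pvDropWhile_eq_drop _ _
          rw [ih _ _ (by omega), hdropj]
          -- right-hand side: split the gap off pvTok (s.drop i)
          conv_rhs => rw [← hsplit]
          rw [pvTok_split (List.takeWhile (fun c => c == ' ') (List.drop i s)
              ++ List.drop (pvSkipSpaces s s.length i) s),
            pvTakeWhile_append_all _ _ _ (fun c hc => by simp [hspq c hc]),
            pvDropWhile_append_all _ _ _ (fun c hc => by simp [hspq c hc]),
            pvStrip_space_prefix _ _ hspall]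
          split <;> rename_i hb <;> simp
      · rw [dif_neg hi']
        have hnil : s.drop (pvSkipSpaces s s.length i) = [] :=
          List.drop_eq_nil_of_le (by omega)
        have hdi : (s.drop i).takeWhile (fun c => c == ' ') = s.drop i := by
          rw [← hsplit, hnil, List.append_nil]
          simpa using hspall
        have hstrip2 : PySem.Chars.strip (s.drop i) = [] := by
          rw [hdi] at hstripsp; exact hstripsp
        have htok : pvTok (s.drop i) = [] := by
          rw [pvTok_of_all_nonquote _ (fun c hc => hspq c (by rw [← hdi] at hc; exact hc))]
          simp [hstrip2]
        rw [htok, List.append_nil]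
    · rw [pvLoopA, dif_neg hi, List.drop_eq_nil_of_le (by omega), pvTok_nil, List.append_nil]

-- ===== B-side invariant =====

theorem pvFoldB_eq (cs : List Char) :
    (∀ (acc : List String) (expr buf : List Char), (∀ c ∈ expr, pvIsQuote c = false) →
        pvFinB (cs.foldl pvStepB (acc, expr, none, buf)) = acc ++ pvTok (expr ++ cs)) ∧
    (∀ (acc : List String) (q : Char) (buf : List Char),
        pvFinB (cs.foldl pvStepB (acc, [], some q, buf)) = acc ++
          match cs.dropWhile (fun c => c != q) with
          | [] => [String.mk (buf ++ cs)]
          | _ :: t' => String.mk (buf ++ cs.takeWhile (fun c => c != q) ++ [q]) :: pvTok t') := by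
  induction cs with
  | nil =>
    constructor
    · intro acc expr buf hexpr
      simp only [List.foldl_nil, pvFinB, List.append_nil]
      rw [pvTok_of_all_nonquote expr hexpr]
      split <;> simp
    · intro acc q buf
      simp [pvFinB]
  | cons c cs ih =>
    constructor
    · intro acc expr buf hexpr
      by_cases hc : c = '"' ∨ c = '\''
      · -- c opens a string literal
        have hcq : pvIsQuote c = true := by simp [pvIsQuote]; tauto
        rw [List.foldl_cons]
        simp only [pvStepB, if_pos hc]
        rw [ih.2]
        rw [pvTok_gap_quote expr c cs hexpr hcq, pvTok_quote_cons c cs hcq]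
        cases hdw : cs.dropWhile (fun x => x != c) with
        | nil =>
          have htw : cs.takeWhile (fun x => x != c) = cs := by
            have := List.takeWhile_append_dropWhile (p := fun x => x != c) (l := cs)
            rw [hdw, List.append_nil] at this; exact this
          simp only [htw]
          split <;> simp
        | cons x t' =>
          split <;> simp

      · -- c joins the expression
        have hcq : pvIsQuote c = false := by simp [pvIsQuote]; tauto
        rw [List.foldl_cons]
        simp only [pvStepB, if_neg hc]
        rw [ih.1 acc (expr ++ [c]) buf (by
          intro x hx
          rcases List.mem_append.mp hx with h | h
          · exact hexpr x h
          · simp at h; subst h; exact hcq)]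
        simp
    · intro acc q buf
      by_cases hc : c = q
      · -- the literal closes
        subst hc
        rw [List.foldl_cons]
        have hstep : pvStepB (acc, [], some c, buf) c
            = (acc ++ [String.mk (buf ++ [c])], [], none, []) := by
          simp [pvStepB]
        rw [hstep, ih.1 _ [] [] (by simp)]
        have hd : (c :: cs).dropWhile (fun x => x != c) = c :: cs := by
          simp
        have ht : (c :: cs).takeWhile (fun x => x != c) = [] := by
          simp
        rw [hd]
        simp [ht]
      · -- another character in the literal
        rw [List.foldl_cons]
        have hstep : pvStepB (acc, [], some q, buf) c = (acc, [], some q, buf ++ [c]) := by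
          simp [pvStepB, hc]
        rw [hstep, ih.2 acc q (buf ++ [c])]
        have hd : (c :: cs).dropWhile (fun x => x != q) = cs.dropWhile (fun x => x != q) := by
          simp [hc]
        have ht : (c :: cs).takeWhile (fun x => x != q) = c :: cs.takeWhile (fun x => x != q) := by
          simp [hc]
        rw [hd, ht]
        cases hdw : cs.dropWhile (fun x => x != q) with
        | nil => simp
        | cons x t' => simp

-- ===== VERDICT (by name: the statement is the Claim_ definition above) =====
theorem yazdir_tokenize_py_spec : Claim_equal_yazdir_tokenize_py := by
  intro metin _
  unfold Spec_yazdir_tokenize_py yazdir_tokenize_py yazdir_tokenize_py_alt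
  rw [pvLoopA_eq metin.toList metin.toList.length 0 [] (by omega)]
  rw [(pvFoldB_eq metin.toList).1 [] [] [] (by simp)]
  simp
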